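-- pv_equiv track=rewrite | github.com/collinsakenga/codewars_solutions | 6 kyu/Bad Apples.py | bad_apples
-- ===== SOURCE A (Python) =====
-- def bad_apples(apples):
--     res=[]
--     remain=[]
--     indexes=[]
--     index=0
--     for i in apples:
--         if i[0]==0 and i[1]==0:
--             continue
--         elif i[0]==0 or i[1]==0:
--             remain.append(i[0]) if i[1]==0 else remain.append(i[1])
--             indexes.append(index)
--         index+=1
--         res.append([i[0], i[1]])
--     for i in range(len(remain)//2):
--         if res[indexes[i*2]][0]==0:
--             res[indexes[i*2]][0]=remain[i*2] if remain[i*2]!=res[indexes[i*2]][1] else remain[i*2+1]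
--             res[indexes[i*2]][0], res[indexes[i*2]][1]=res[indexes[i*2]][1], res[indexes[i*2]][0]
--         elif res[indexes[i*2]][1]==0:
--             res[indexes[i*2]][1]=remain[i*2] if remain[i*2]!=res[indexes[i*2]][0] else remain[i*2+1]
--     return [i for i in res if (i[0]!=0 and i[1]!=0)]
-- ===== SOURCE B (Python) =====
-- def bad_apples(apples):
--     out = []
--     pend = None  # (index in out of the placeholder, leftover value) of an unpaired one-zero pair
--     for p in apples:
--         x, y = p[0], p[1]
--         if x == 0 and y == 0:
--             continue
--         if x != 0 and y != 0:
--             out.append([x, y])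
--             continue
--         v = x if x != 0 else y
--         if pend is None:
--             pend = (len(out), v)
--             out.append(None)
--         else:
--             out[pend[0]] = [pend[1], v]
--             pend = None
--     return [e for e in out if e is not None]
-- ===== Notes on version B (the rewrite author's own statement) =====
-- stated objective: simpler
-- what changed: A's three phases (build res plus parallel remain/indexes bookkeeping lists, then a second index-arithmetic fix-up loop over hole pairs, then a final filter) are replaced by a single pass that keeps one pending placeholder: a one-zero pair reserves a slot, the next one-zero pair fills it with [pending_value, current_value], and unfilled placeholders are dropped at the end.
import Mathlib
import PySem

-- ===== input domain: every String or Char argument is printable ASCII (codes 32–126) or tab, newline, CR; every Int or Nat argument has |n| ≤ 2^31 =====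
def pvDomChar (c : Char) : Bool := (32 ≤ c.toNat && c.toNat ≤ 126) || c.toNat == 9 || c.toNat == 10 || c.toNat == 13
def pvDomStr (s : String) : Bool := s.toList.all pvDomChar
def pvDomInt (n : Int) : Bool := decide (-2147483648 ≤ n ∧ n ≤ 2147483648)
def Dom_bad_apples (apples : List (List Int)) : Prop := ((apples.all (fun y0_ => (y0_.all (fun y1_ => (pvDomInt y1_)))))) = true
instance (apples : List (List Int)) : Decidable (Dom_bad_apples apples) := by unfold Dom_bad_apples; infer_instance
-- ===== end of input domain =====

-- B replaces A's three phases (res + remain/indexes bookkeeping, a second fix-up loop, a filter)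
-- by one pass with a single pending placeholder; equal return value proved on Pre_ (pairs of length ≥ 2).

-- ===== PORT A =====
-- i[k] for k = 0,1; exact when k < i.length, which Pre_bad_apples guarantees (Python raises IndexError otherwise)
def pvGetA (i : List Int) (k : Nat) : Int := i.getD k 0

-- one iteration of A's first loop; state = (res, remain, indexes, index)
def stepA1 (st : List (List Int) × List Int × List Nat × Nat) (i : List Int) :
    List (List Int) × List Int × List Nat × Nat :=
  if pvGetA i 0 = 0 ∧ pvGetA i 1 = 0 then st
  else if pvGetA i 0 = 0 ∨ pvGetA i 1 = 0 then
    (st.1 ++ [[pvGetA i 0, pvGetA i 1]],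
     st.2.1 ++ [if pvGetA i 1 = 0 then pvGetA i 0 else pvGetA i 1],
     st.2.2.1 ++ [st.2.2.2], st.2.2.2 + 1)
  else (st.1 ++ [[pvGetA i 0, pvGetA i 1]], st.2.1, st.2.2.1, st.2.2.2 + 1)

-- body of A's second loop, with the values remain[i*2], remain[i*2+1], indexes[i*2] already read
def stepFix (res : List (List Int)) (j : Nat) (v w : Int) : List (List Int) :=
  let e := res.getD j []
  if e.getD 0 0 = 0 then
    let fill := if v ≠ e.getD 1 0 then v else w
    let res1 := res.set j (e.set 0 fill)
    let e1 := res1.getD j []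
    res1.set j ((e1.set 0 (e1.getD 1 0)).set 1 (e1.getD 0 0))
  else if e.getD 1 0 = 0 then
    let fill := if v ≠ e.getD 0 0 then v else w
    res.set j (e.set 1 fill)
  else res

def stepA2 (remain : List Int) (indexes : List Nat) (res : List (List Int)) (i : Nat) :
    List (List Int) :=
  stepFix res (indexes.getD (i*2) 0) (remain.getD (i*2) 0) (remain.getD (i*2+1) 0)

-- condition of A's final list comprehension
def keepNZ (i : List Int) : Bool := decide (pvGetA i 0 ≠ 0 ∧ pvGetA i 1 ≠ 0)

def bad_apples (apples : List (List Int)) : List (List Int) :=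
  let st := apples.foldl stepA1 ([], [], [], 0)
  let res := (List.range (st.2.1.length / 2)).foldl (stepA2 st.2.1 st.2.2.1) st.1
  res.filter keepNZ

-- ===== PORT B =====
-- one iteration of B's single pass; state = (out, pend), pend = (placeholder index, leftover value)
def stepB (st : List (Option (List Int)) × Option (Nat × Int)) (p : List Int) :
    List (Option (List Int)) × Option (Nat × Int) :=
  if p.getD 0 0 = 0 ∧ p.getD 1 0 = 0 then st
  else if p.getD 0 0 ≠ 0 ∧ p.getD 1 0 ≠ 0 then (st.1 ++ [some [p.getD 0 0, p.getD 1 0]], st.2)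
  else
    let v := if p.getD 0 0 ≠ 0 then p.getD 0 0 else p.getD 1 0
    match st.2 with
    | none => (st.1 ++ [none], some (st.1.length, v))
    | some (j, u) => (st.1.set j (some [u, v]), none)

def bad_apples_alt (apples : List (List Int)) : List (List Int) :=
  ((apples.foldl stepB ([], none)).1).filterMap id

-- ===== PRECONDITION & SPEC =====
-- Pre_ excludes exactly the inputs where Python A raises IndexError: an inner list of length < 2.
def Pre_bad_apples (apples : List (List Int)) : Prop := ∀ p ∈ apples, 2 ≤ p.length
instance (apples : List (List Int)) : Decidable (Pre_bad_apples apples) := by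
  unfold Pre_bad_apples; infer_instance

def pvWitness_bad_apples : List (List Int) := [[1, 0], [2, 3], [0, 4], [0, 0], [5, 0]]

def Spec_bad_apples (apples : List (List Int)) (out : List (List Int)) : Prop := out = bad_apples_alt apples
instance (apples : List (List Int)) (out : List (List Int)) : Decidable (Spec_bad_apples apples out) := by unfold Spec_bad_apples; infer_instance

-- ===== CLAIM (what is proved, stated in full; the proofs are below) =====
def Claim_equal_bad_apples : Prop := ∀ (apples : List (List Int)), Dom_bad_apples apples → Pre_bad_apples apples → Spec_bad_apples apples (bad_apples apples)

-- ===== LEMMAS AND PROOFS =====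

-- classification of an input pair
def isSkipB (p : List Int) : Bool := decide (p.getD 0 0 = 0 ∧ p.getD 1 0 = 0)
def isGoodB (p : List Int) : Bool := decide (p.getD 0 0 ≠ 0 ∧ p.getD 1 0 ≠ 0)
def hVal (p : List Int) : Int := if p.getD 0 0 ≠ 0 then p.getD 0 0 else p.getD 1 0

def goodsOf (t : List (List Int)) : List (List Int) :=
  t.filterMap (fun p => if isGoodB p then some [p.getD 0 0, p.getD 1 0] else none)

-- first one-zero pair of t, with t minus that pair
def extractHole : List (List Int) → Option (Int × List (List Int))
  | [] => none
  | p :: t =>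
    if isSkipB p || isGoodB p then (extractHole t).map (fun q => (q.1, p :: q.2))
    else some (hVal p, t)

lemma extractHole_length : ∀ {t : List (List Int)} {w t'},
    extractHole t = some (w, t') → t'.length < t.length := by
  intro t
  induction t with
  | nil => intro w t' h; simp [extractHole] at h
  | cons p t ih =>
    intro w t' h
    by_cases hc : (isSkipB p || isGoodB p) = true
    · simp only [extractHole, hc, if_pos] at h
      rcases hmap : extractHole t with _ | ⟨w0, t0⟩ <;> rw [hmap] at h <;> simp at h
      rcases h with ⟨h1, h2⟩
      subst h2
      simpa using Nat.succ_lt_succ (ih hmap)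
    · simp only [extractHole, hc, if_neg, reduceCtorEq, not_false_iff] at h
      cases h
      simp

-- reference value: one recursive description both ports are proved equal to
def go : List (List Int) → List (List Int)
  | [] => []
  | p :: t =>
    if isSkipB p then go t
    else if isGoodB p then [p.getD 0 0, p.getD 1 0] :: go t
    else
      match h : extractHole t with
      | some (w, t') => [hVal p, w] :: go t'
      | none => go t
  termination_by t => t.length
  decreasing_by
  all_goals simp
  all_goals (have := extractHole_length h; omega)

-- go unfolding equations
lemma go_skip {p : List Int} {t : List (List Int)} (h : isSkipB p = true) :
    go (p :: t) = go t := by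
  rw [go]; simp [h]

lemma go_good {p : List Int} {t : List (List Int)} (hs : isSkipB p = false) (hg : isGoodB p = true) :
    go (p :: t) = [p.getD 0 0, p.getD 1 0] :: go t := by
  rw [go]; simp [hs, hg]

lemma go_hole_some {p : List Int} {t t' : List (List Int)} {w : Int}
    (hs : isSkipB p = false) (hg : isGoodB p = false) (he : extractHole t = some (w, t')) :
    go (p :: t) = [hVal p, w] :: go t' := by
  rw [go]
  simp only [hs, hg, Bool.false_eq_true, if_false]
  split
  · rename_i w' t'' hm; rw [he] at hm; cases hm; rfl
  · rename_i hm; rw [he] at hm; cases hm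

lemma go_hole_none {p : List Int} {t : List (List Int)}
    (hs : isSkipB p = false) (hg : isGoodB p = false) (he : extractHole t = none) :
    go (p :: t) = go t := by
  rw [go]
  simp only [hs, hg, Bool.false_eq_true, if_false]
  split
  · rename_i w' t'' hm; rw [he] at hm; cases hm
  · rfl

-- A's first-pass state components
def pA (t : List (List Int)) : List (List Int) := (t.foldl stepA1 ([], [], [], 0)).1
def pR (t : List (List Int)) : List Int := (t.foldl stepA1 ([], [], [], 0)).2.1
def pI (t : List (List Int)) : List Nat := (t.foldl stepA1 ([], [], [], 0)).2.2.1

lemma stepA1_skip {i : List Int} (h : isSkipB i = true) (st : List (List Int) × List Int × List Nat × Nat) :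
    stepA1 st i = st := by
  simp [isSkipB] at h
  simp [stepA1, pvGetA, h]

lemma stepA1_good {i : List Int} (h : isGoodB i = true)
    (res : List (List Int)) (rem : List Int) (idx : List Nat) (n : Nat) :
    stepA1 (res, rem, idx, n) i = (res ++ [[i.getD 0 0, i.getD 1 0]], rem, idx, n + 1) := by
  simp [isGoodB] at h
  simp [stepA1, pvGetA, h.1, h.2]

lemma stepA1_hole {i : List Int} (hs : isSkipB i = false) (hg : isGoodB i = false)
    (res : List (List Int)) (rem : List Int) (idx : List Nat) (n : Nat) :
    stepA1 (res, rem, idx, n) i = (res ++ [[i.getD 0 0, i.getD 1 0]], rem ++ [hVal i], idx ++ [n], n + 1) := by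
  simp [isSkipB] at hs
  simp [isGoodB] at hg
  by_cases h1 : i.getD 1 0 = 0
  · have h0 : i.getD 0 0 ≠ 0 := by
      intro h0; exact hs (by simpa [List.getD] using h0) (by simpa [List.getD] using h1)
    simp only [List.getD] at h0 h1
    simp [stepA1, pvGetA, hVal, List.getD, h0, h1]
  · have h0 : i.getD 0 0 = 0 := by
      by_cases h0 : i.getD 0 0 = 0
      · exact h0
      · exact absurd (hg (by simpa [List.getD] using h0)) (by simpa [List.getD] using h1)
    simp only [List.getD] at h0 h1
    simp [stepA1, pvGetA, hVal, List.getD, h0, h1]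

lemma foldA_shift : ∀ (t : List (List Int)) (res : List (List Int)) (rem : List Int) (idx : List Nat),
    t.foldl stepA1 (res, rem, idx, res.length)
      = (res ++ pA t, rem ++ pR t, idx ++ (pI t).map (· + res.length), (res ++ pA t).length) := by
  intro t
  induction t with
  | nil => intro res rem idx; simp [pA, pR, pI]
  | cons p t ih =>
    intro res rem idx
    by_cases hs : isSkipB p = true
    · have e2 : (p :: t).foldl stepA1 ([], [], [], 0) = t.foldl stepA1 ([], [], [], 0) := by
        rw [List.foldl_cons, stepA1_skip hs]
      simp only [pA, pR, pI, e2, List.foldl_cons, stepA1_skip hs]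
      exact ih res rem idx
    · by_cases hg : isGoodB p = true
      · have e1 : (p :: t).foldl stepA1 (res, rem, idx, res.length)
            = t.foldl stepA1 (res ++ [[p.getD 0 0, p.getD 1 0]], rem, idx,
                (res ++ [[p.getD 0 0, p.getD 1 0]]).length) := by
          rw [List.foldl_cons, stepA1_good hg]; simp
        have e2 : (p :: t).foldl stepA1 ([], [], [], 0)
            = t.foldl stepA1 ([[p.getD 0 0, p.getD 1 0]], [], [], ([[p.getD 0 0, p.getD 1 0]] : List (List Int)).length) := by
          rw [List.foldl_cons, stepA1_good hg]; simp
        simp only [pA, pR, pI, e1, e2, ih]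
        simp [Prod.ext_iff, List.map_map, Function.comp, Nat.add_comm, Nat.add_assoc, Nat.add_left_comm]
      · have e1 : (p :: t).foldl stepA1 (res, rem, idx, res.length)
            = t.foldl stepA1 (res ++ [[p.getD 0 0, p.getD 1 0]], rem ++ [hVal p], idx ++ [res.length],
                (res ++ [[p.getD 0 0, p.getD 1 0]]).length) := by
          rw [List.foldl_cons, stepA1_hole (by simpa using hs) (by simpa using hg)]; simp
        have e2 : (p :: t).foldl stepA1 ([], [], [], 0)
            = t.foldl stepA1 ([[p.getD 0 0, p.getD 1 0]], [hVal p], [0], ([[p.getD 0 0, p.getD 1 0]] : List (List Int)).length) := by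
          rw [List.foldl_cons, stepA1_hole (by simpa using hs) (by simpa using hg)]; simp
        simp only [pA, pR, pI, e1, e2, ih]
        simp [Prod.ext_iff, List.map_map, Function.comp, Nat.add_comm, Nat.add_assoc, Nat.add_left_comm]

lemma passA_eta (t : List (List Int)) :
    t.foldl stepA1 ([], [], [], 0) = (pA t, pR t, pI t, (pA t).length) := by
  have := foldA_shift t [] [] []
  simpa using this

lemma pasA_skip {p : List Int} {t : List (List Int)} (h : isSkipB p = true) :
    pA (p :: t) = pA t ∧ pR (p :: t) = pR t ∧ pI (p :: t) = pI t := by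
  simp [pA, pR, pI, List.foldl_cons, stepA1_skip h]

lemma pasA_good {p : List Int} {t : List (List Int)} (h : isGoodB p = true) :
    pA (p :: t) = [p.getD 0 0, p.getD 1 0] :: pA t ∧ pR (p :: t) = pR t
      ∧ pI (p :: t) = (pI t).map (· + 1) := by
  have e2 : (p :: t).foldl stepA1 ([], [], [], 0)
      = t.foldl stepA1 ([[p.getD 0 0, p.getD 1 0]], [], [], ([[p.getD 0 0, p.getD 1 0]] : List (List Int)).length) := by
    rw [List.foldl_cons, stepA1_good h]; simp
  rw [pA, pR, pI, e2, foldA_shift]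
  refine ⟨by simp, by simp, by simp⟩

lemma pasA_hole {p : List Int} {t : List (List Int)} (hs : isSkipB p = false) (hg : isGoodB p = false) :
    pA (p :: t) = [p.getD 0 0, p.getD 1 0] :: pA t ∧ pR (p :: t) = hVal p :: pR t
      ∧ pI (p :: t) = 0 :: (pI t).map (· + 1) := by
  have e2 : (p :: t).foldl stepA1 ([], [], [], 0)
      = t.foldl stepA1 ([[p.getD 0 0, p.getD 1 0]], [hVal p], [0], ([[p.getD 0 0, p.getD 1 0]] : List (List Int)).length) := by
    rw [List.foldl_cons, stepA1_hole hs hg]; simp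
  rw [pA, pR, pI, e2, foldA_shift]
  refine ⟨by simp, by simp, by simp⟩

lemma passA_append (l1 l2 : List (List Int)) :
    pA (l1 ++ l2) = pA l1 ++ pA l2 ∧ pR (l1 ++ l2) = pR l1 ++ pR l2
      ∧ pI (l1 ++ l2) = pI l1 ++ (pI l2).map (· + (pA l1).length) := by
  rw [pA, pR, pI, List.foldl_append, passA_eta l1, foldA_shift]
  exact ⟨rfl, rfl, rfl⟩

lemma pRI_len (t : List (List Int)) : (pI t).length = (pR t).length := by
  induction t with
  | nil => simp [pA, pR, pI]
  | cons p t ih =>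
    by_cases hs : isSkipB p = true
    · rw [(pasA_skip hs).2.1, (pasA_skip hs).2.2]; exact ih
    · by_cases hg : isGoodB p = true
      · rw [(pasA_good hg).2.1, (pasA_good hg).2.2]; simpa using ih
      · rw [(pasA_hole (by simpa using hs) (by simpa using hg)).2.1, (pasA_hole (by simpa using hs) (by simpa using hg)).2.2]
        simpa using ih

lemma skip_not_good {p : List Int} (h : isSkipB p = true) : isGoodB p = false := by
  simp [isSkipB] at h
  simp [isGoodB, h.1]

lemma goodsOf_cons_good {p : List Int} {t : List (List Int)} (h : isGoodB p = true) :
    goodsOf (p :: t) = [p.getD 0 0, p.getD 1 0] :: goodsOf t := by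
  simp [goodsOf, h]

lemma goodsOf_cons_notgood {p : List Int} {t : List (List Int)} (h : isGoodB p = false) :
    goodsOf (p :: t) = goodsOf t := by
  simp [goodsOf, h]

lemma passA_holeFree : ∀ (t : List (List Int)), (∀ p ∈ t, (isSkipB p || isGoodB p) = true) →
    pA t = goodsOf t ∧ pR t = [] ∧ pI t = [] := by
  intro t
  induction t with
  | nil => intro _; simp [pA, pR, pI, goodsOf]
  | cons p t ih =>
    intro h
    have hp := h p (by simp)
    have ht := ih (fun q hq => h q (by simp [hq]))
    by_cases hs : isSkipB p = true
    · rw [(pasA_skip hs).1, (pasA_skip hs).2.1, (pasA_skip hs).2.2,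
        goodsOf_cons_notgood (skip_not_good hs)]
      exact ht
    · have hg : isGoodB p = true := by simpa [hs] using hp
      rw [(pasA_good hg).1, (pasA_good hg).2.1, (pasA_good hg).2.2,
        goodsOf_cons_good hg, ht.1, ht.2.1, ht.2.2]
      simp

lemma keepNZ_goods {t : List (List Int)} : ∀ e ∈ goodsOf t, keepNZ e = true := by
  intro e he
  simp only [goodsOf, List.mem_filterMap] at he
  rcases he with ⟨p, _, hp⟩
  by_cases hg : isGoodB p = true
  · rw [if_pos hg] at hp
    cases hp
    simp [isGoodB] at hg
    simp [keepNZ, pvGetA, hg.1, hg.2]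
  · rw [if_neg (by simpa using hg)] at hp; cases hp

lemma hole_shape {p : List Int} (hs : isSkipB p = false) (hg : isGoodB p = false) :
    hVal p ≠ 0
      ∧ ([p.getD 0 0, p.getD 1 0] = [(0 : Int), hVal p] ∨ [p.getD 0 0, p.getD 1 0] = [hVal p, 0])
      ∧ keepNZ [p.getD 0 0, p.getD 1 0] = false := by
  simp only [isSkipB, decide_eq_false_iff_not, not_and] at hs
  simp only [isGoodB, decide_eq_false_iff_not, not_and, not_not] at hg
  by_cases h0 : p.getD 0 0 = 0
  · have h1 : p.getD 1 0 ≠ 0 := by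
      intro h1; exact hs (by simpa [List.getD] using h0) (by simpa [List.getD] using h1)
    simp only [List.getD] at h0 h1
    refine ⟨by simp [hVal, List.getD, h0, h1], Or.inl (by simp [hVal, List.getD, h0, h1]),
      by simp [keepNZ, pvGetA, List.getD, h0]⟩
  · have h1 : p.getD 1 0 = 0 := by
      have := hg (by simpa [List.getD] using h0)
      simpa [List.getD] using this
    simp only [List.getD] at h0 h1
    refine ⟨by simp [hVal, List.getD, h0], Or.inr (by simp [hVal, List.getD, h0, h1]),
      by simp [keepNZ, pvGetA, List.getD, h1]⟩

lemma extractHole_none : ∀ {t : List (List Int)}, extractHole t = none →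
    ∀ p ∈ t, (isSkipB p || isGoodB p) = true := by
  intro t
  induction t with
  | nil => intro _ p hp; cases hp
  | cons p t ih =>
    intro h q hq
    by_cases hc : (isSkipB p || isGoodB p) = true
    · simp only [extractHole, hc, if_pos] at h
      rcases hm : extractHole t with _ | z
      · rcases List.mem_cons.mp hq with hq1 | hq1
        · subst hq1; exact hc
        · exact ih hm q hq1
      · rw [hm] at h; simp at h
    · simp [extractHole, hc] at h

lemma extractHole_some : ∀ {t t' : List (List Int)} {w : Int}, extractHole t = some (w, t') →
    ∃ pre q post, t = pre ++ q :: post ∧ t' = pre ++ post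
      ∧ (∀ r ∈ pre, (isSkipB r || isGoodB r) = true)
      ∧ isSkipB q = false ∧ isGoodB q = false ∧ hVal q = w := by
  intro t
  induction t with
  | nil => intro t' w h; simp [extractHole] at h
  | cons p t ih =>
    intro t' w h
    by_cases hc : (isSkipB p || isGoodB p) = true
    · simp only [extractHole, hc, if_pos] at h
      rcases hm : extractHole t with _ | ⟨w0, t0⟩ <;> rw [hm] at h <;> simp at h
      rcases h with ⟨h1, h2⟩
      subst h1 h2
      rcases ih hm with ⟨pre, q, post, e1, e2, hpre, hq1, hq2, hq3⟩
      exact ⟨p :: pre, q, post, by simp [e1], by simp [e2],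
        fun r hr => by
          rcases List.mem_cons.mp hr with hr1 | hr1
          · subst hr1; exact hc
          · exact hpre r hr1,
        hq1, hq2, hq3⟩
    · simp only [extractHole, hc, if_neg, reduceCtorEq, not_false_iff] at h
      cases h
      refine ⟨[], p, t, by simp, by simp, by simp, ?_, ?_, rfl⟩
      · rcases Bool.or_eq_false_iff.mp (by simpa using hc) with ⟨h1, _⟩; exact h1
      · rcases Bool.or_eq_false_iff.mp (by simpa using hc) with ⟨_, h2⟩; exact h2

lemma go_append_goods : ∀ (pre : List (List Int)), (∀ p ∈ pre, (isSkipB p || isGoodB p) = true) →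
    ∀ post, go (pre ++ post) = goodsOf pre ++ go post := by
  intro pre
  induction pre with
  | nil => intro _ post; simp [goodsOf]
  | cons p pre ih =>
    intro h post
    have hp := h p (by simp)
    have ihp := ih (fun q hq => h q (by simp [hq])) post
    by_cases hs : isSkipB p = true
    · rw [List.cons_append, go_skip hs, ihp, goodsOf_cons_notgood (skip_not_good hs)]
    · have hg : isGoodB p = true := by simpa [hs] using hp
      rw [List.cons_append, go_good (by simpa using hs) hg, ihp, goodsOf_cons_good hg]
      simp

lemma go_holeFree {t : List (List Int)} (h : ∀ p ∈ t, (isSkipB p || isGoodB p) = true) :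
    go t = goodsOf t := by
  have := go_append_goods t h []
  simpa [go] using this

lemma stepFix_hole {v : Int} (w : Int) (hv : v ≠ 0) {hp : List Int}
    (h : hp = [0, v] ∨ hp = [v, 0]) (rest : List (List Int)) :
    stepFix (hp :: rest) 0 v w = [v, w] :: rest := by
  rcases h with h | h <;> subst h <;> simp [stepFix, hv]

lemma stepFix_shift (pre res : List (List Int)) (j : Nat) (v w : Int) :
    stepFix (pre ++ res) (pre.length + j) v w = pre ++ stepFix res j v w := by
  have hget : ∀ res' : List (List Int), (pre ++ res').getD (pre.length + j) [] = res'.getD j [] := by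
    intro res'; simp [List.getD, List.getElem?_append_right]
  have hset : ∀ (a : List Int) (res' : List (List Int)),
      (pre ++ res').set (pre.length + j) a = pre ++ res'.set j a := by
    intro a res'; simp
  simp only [stepFix, hget]
  split
  · rw [hset, hget, hset]
  · split
    · rw [hset]
    · rfl

-- A's second loop as recursion on the (remain, indexes) pair lists
def fixPairs : List (List Int) → List Int → List Nat → List (List Int)
  | res, [], _ => res
  | res, [_], _ => res
  | res, _ :: _ :: _, [] => res
  | res, _ :: _ :: _, [_] => res
  | res, v :: w :: rem, j :: _ :: idx => fixPairs (stepFix res j v w) rem idx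

lemma fixPairs_shift (res : List (List Int)) (rem : List Int) (idx : List Nat) :
    ∀ pre : List (List Int),
      fixPairs (pre ++ res) rem (idx.map (· + pre.length)) = pre ++ fixPairs res rem idx := by
  induction res, rem, idx using fixPairs.induct with
  | case1 res idx => intro pre; simp [fixPairs]
  | case2 res v idx => intro pre; cases idx with
    | nil => simp [fixPairs]
    | cons j idx => cases idx <;> simp [fixPairs]
  | case3 res v w rem => intro pre; simp [fixPairs]
  | case4 res v w rem j => intro pre; simp [fixPairs]
  | case5 res v w rem j j2 idx ih =>
    intro pre
    simp only [List.map_cons, fixPairs]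
    rw [Nat.add_comm j pre.length, stepFix_shift]
    exact ih pre

lemma stepA2_zero (v w : Int) (rem : List Int) (j j2 : Nat) (idx : List Nat)
    (res : List (List Int)) :
    stepA2 (v :: w :: rem) (j :: j2 :: idx) res 0 = stepFix res j v w := by
  simp [stepA2]

lemma stepA2_succ (v w : Int) (rem : List Int) (j j2 : Nat) (idx : List Nat)
    (res : List (List Int)) (i : Nat) :
    stepA2 (v :: w :: rem) (j :: j2 :: idx) res (i + 1) = stepA2 rem idx res i := by
  have h2 : (i + 1) * 2 = i * 2 + 1 + 1 := by ring
  have h3 : (i + 1) * 2 + 1 = i * 2 + 1 + 1 + 1 := by ring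
  simp [stepA2, h2, h3]

lemma fixLoop (res : List (List Int)) (rem : List Int) (idx : List Nat) :
    idx.length = rem.length →
    (List.range (rem.length / 2)).foldl (stepA2 rem idx) res = fixPairs res rem idx := by
  induction res, rem, idx using fixPairs.induct with
  | case1 res idx => intro _; simp [fixPairs]
  | case2 res v idx => intro _; simp [fixPairs]
  | case3 res v w rem => intro h; simp at h
  | case4 res v w rem j => intro h; simp at h
  | case5 res v w rem j j2 idx ih =>
    intro h
    have hlen : (v :: w :: rem).length / 2 = rem.length / 2 + 1 := by simp; omega
    rw [hlen, List.range_succ_eq_map, List.foldl_cons, List.foldl_map, stepA2_zero]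
    have he : (fun (x : List (List Int)) (y : Nat) => stepA2 (v :: w :: rem) (j :: j2 :: idx) x y.succ)
        = fun x y => stepA2 rem idx x y := by
      funext x y; exact stepA2_succ v w rem j j2 idx x y
    rw [he, ih (by simpa using h)]
    simp [fixPairs]

lemma stepB_skip {p : List Int} (h : isSkipB p = true)
    (st : List (Option (List Int)) × Option (Nat × Int)) : stepB st p = st := by
  simp [isSkipB] at h
  simp [stepB, h]

lemma stepB_good {p : List Int} (h : isGoodB p = true)
    (out : List (Option (List Int))) (pend : Option (Nat × Int)) :
    stepB (out, pend) p = (out ++ [some [p.getD 0 0, p.getD 1 0]], pend) := by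
  simp [isGoodB] at h
  simp [stepB, h.1, h.2]

lemma stepB_hole_none {p : List Int} (hs : isSkipB p = false) (hg : isGoodB p = false)
    (out : List (Option (List Int))) :
    stepB (out, none) p = (out ++ [none], some (out.length, hVal p)) := by
  simp only [isSkipB, decide_eq_false_iff_not, not_and] at hs
  simp only [isGoodB, decide_eq_false_iff_not, not_and, not_not] at hg
  by_cases h0 : p.getD 0 0 = 0
  · have h1 : p.getD 1 0 ≠ 0 := fun h1 =>
      hs (by simpa [List.getD] using h0) (by simpa [List.getD] using h1)
    simp only [List.getD] at h0 h1
    simp [stepB, hVal, List.getD, h0, h1]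
  · have h1 : p.getD 1 0 = 0 := by
      have := hg (by simpa [List.getD] using h0)
      simpa [List.getD] using this
    simp only [List.getD] at h0 h1
    simp [stepB, hVal, List.getD, h0, h1]

lemma stepB_hole_some {p : List Int} (hs : isSkipB p = false) (hg : isGoodB p = false)
    (out : List (Option (List Int))) (j : Nat) (u : Int) :
    stepB (out, some (j, u)) p = (out.set j (some [u, hVal p]), none) := by
  simp only [isSkipB, decide_eq_false_iff_not, not_and] at hs
  simp only [isGoodB, decide_eq_false_iff_not, not_and, not_not] at hg
  by_cases h0 : p.getD 0 0 = 0
  · have h1 : p.getD 1 0 ≠ 0 := fun h1 =>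
      hs (by simpa [List.getD] using h0) (by simpa [List.getD] using h1)
    simp only [List.getD] at h0 h1
    simp [stepB, hVal, List.getD, h0, h1]
  · have h1 : p.getD 1 0 = 0 := by
      have := hg (by simpa [List.getD] using h0)
      simpa [List.getD] using this
    simp only [List.getD] at h0 h1
    simp [stepB, hVal, List.getD, h0, h1]

lemma foldB_goods : ∀ (pre : List (List Int)), (∀ p ∈ pre, (isSkipB p || isGoodB p) = true) →
    ∀ (out : List (Option (List Int))) (pend : Option (Nat × Int)),
      pre.foldl stepB (out, pend) = (out ++ (goodsOf pre).map some, pend) := by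
  intro pre
  induction pre with
  | nil => intro _ out pend; simp [goodsOf]
  | cons p pre ih =>
    intro h out pend
    have hp := h p (by simp)
    have iht := ih (fun q hq => h q (by simp [hq]))
    by_cases hs : isSkipB p = true
    · rw [List.foldl_cons, stepB_skip hs, iht, goodsOf_cons_notgood (skip_not_good hs)]
    · have hg : isGoodB p = true := by simpa [hs] using hp
      rw [List.foldl_cons, stepB_good hg, iht, goodsOf_cons_good hg]
      simp

lemma set_mid (out : List (Option (List Int))) (G : List (Option (List Int)))
    (x y : Option (List Int)) :
    (out ++ x :: G).set out.length y = out ++ y :: G := by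
  have : (out ++ x :: G).set (out.length + 0) y = out ++ (x :: G).set 0 y := by simp
  simpa using this

-- B's run equals go (main loop invariant for B)
lemma altB : ∀ (n : Nat) (t : List (List Int)), t.length ≤ n →
    ∀ out : List (Option (List Int)),
      ((t.foldl stepB (out, none)).1).filterMap id = out.filterMap id ++ go t := by
  intro n
  induction n with
  | zero =>
    intro t ht out
    have : t = [] := List.eq_nil_of_length_eq_zero (Nat.le_zero.mp ht)
    subst this
    simp [go]
  | succ n ih =>
    intro t ht out
    cases t with
    | nil => simp [go]
    | cons p t =>
      have htn : t.length ≤ n := by simpa using ht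
      by_cases hs : isSkipB p = true
      · rw [List.foldl_cons, stepB_skip hs, go_skip hs]
        exact ih t htn out
      · have hs' : isSkipB p = false := by simpa using hs
        by_cases hg : isGoodB p = true
        · rw [List.foldl_cons, stepB_good hg, go_good hs' hg, ih t htn]
          simp
        · have hg' : isGoodB p = false := by simpa using hg
          rw [List.foldl_cons, stepB_hole_none hs' hg' out]
          rcases hE : extractHole t with _ | ⟨w, t'⟩
          · -- no partner: the placeholder stays `none` and is dropped
            have hfree := extractHole_none hE
            rw [foldB_goods t hfree, go_hole_none hs' hg' hE, go_holeFree hfree]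
            simp
          · rcases extractHole_some hE with ⟨pre, q, post, e1, e2, hpre, hq1, hq2, hq3⟩
            subst e1 e2
            rw [List.foldl_append, foldB_goods pre hpre, List.foldl_cons,
              stepB_hole_some hq1 hq2, List.append_assoc]
            simp only [List.singleton_append]
            rw [set_mid out ((goodsOf pre).map some) none (some [hVal p, hVal q])]
            have hpostn : post.length ≤ n := by
              simp [List.length_append] at htn
              omega
            rw [ih post hpostn (out ++ some [hVal p, hVal q] :: (goodsOf pre).map some)]
            rw [go_hole_some hs' hg' hE, hq3, go_append_goods pre hpre post]
            simp

lemma fixPairs_shift' (res : List (List Int)) (rem : List Int) (idx : List Nat)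
    (pre : List (List Int)) {k : Nat} (h : k = pre.length) :
    fixPairs (pre ++ res) rem (idx.map (· + k)) = pre ++ fixPairs res rem idx := by
  subst h; exact fixPairs_shift res rem idx pre

lemma keepNZ_pair {v w : Int} (hv : v ≠ 0) (hw : w ≠ 0) : keepNZ [v, w] = true := by
  simp [keepNZ, pvGetA, hv, hw]

-- A's run equals go (main invariant for A: first pass + pairwise fix-ups + filter)
lemma altA : ∀ (n : Nat) (t : List (List Int)), t.length ≤ n →
    (fixPairs (pA t) (pR t) (pI t)).filter keepNZ = go t := by
  intro n
  induction n with
  | zero =>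
    intro t ht
    have : t = [] := List.eq_nil_of_length_eq_zero (Nat.le_zero.mp ht)
    subst this
    simp [pA, pR, pI, fixPairs, go]
  | succ n ih =>
    intro t ht
    cases t with
    | nil => simp [pA, pR, pI, fixPairs, go]
    | cons p t =>
      have htn : t.length ≤ n := by simpa using ht
      by_cases hs : isSkipB p = true
      · rw [(pasA_skip hs).1, (pasA_skip hs).2.1, (pasA_skip hs).2.2, go_skip hs]
        exact ih t htn
      · have hs' : isSkipB p = false := by simpa using hs
        by_cases hg : isGoodB p = true
        · rw [(pasA_good hg).1, (pasA_good hg).2.1, (pasA_good hg).2.2, go_good hs' hg]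
          have hshift := fixPairs_shift (pA t) (pR t) (pI t) [[p.getD 0 0, p.getD 1 0]]
          simp only [List.singleton_append, List.length_cons, List.length_nil, Nat.zero_add] at hshift
          have hkeep : keepNZ [p.getD 0 0, p.getD 1 0] = true := by
            simp [isGoodB] at hg
            simp [keepNZ, pvGetA, hg.1, hg.2]
          rw [hshift, List.filter_cons, hkeep]
          simp [ih t htn]
        · have hg' : isGoodB p = false := by simpa using hg
          rw [(pasA_hole hs' hg').1, (pasA_hole hs' hg').2.1, (pasA_hole hs' hg').2.2]
          rcases hE : extractHole t with _ | ⟨w, t'⟩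
          · -- no partner: the lone hole entry is never fixed and gets filtered out
            have hfree := extractHole_none hE
            rcases passA_holeFree t hfree with ⟨hA, hR, hI⟩
            rw [hA, hR, hI, go_hole_none hs' hg' hE, go_holeFree hfree]
            show (fixPairs _ [hVal p] _).filter keepNZ = _
            rw [show fixPairs ([p.getD 0 0, p.getD 1 0] :: goodsOf t) [hVal p]
                  (0 :: List.map (· + 1) []) = [p.getD 0 0, p.getD 1 0] :: goodsOf t from rfl]
            rw [List.filter_cons, (hole_shape hs' hg').2.2]
            simp [List.filter_eq_self.mpr keepNZ_goods]
          · rcases extractHole_some hE with ⟨pre, q, post, e1, e2, hpre, hq1, hq2, hq3⟩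
            subst e1 e2
            rcases passA_append pre (q :: post) with ⟨eA, eR, eI⟩
            rcases passA_holeFree pre hpre with ⟨hA, hR, hI⟩
            rcases pasA_hole hq1 hq2 with ⟨fA, fR, fI⟩
            rw [eA, eR, eI, hA, hR, hI, fA, fR, fI]
            simp only [List.nil_append]
            have hpostn : post.length ≤ n := by
              simp [List.length_append] at htn
              omega
            have hidx : (0 : Nat) :: List.map (· + 1)
                  (List.map (· + (goodsOf pre).length) (0 :: List.map (· + 1) (pI post)))
                = 0 :: ((goodsOf pre).length + 1)
                    :: List.map (· + ((goodsOf pre).length + 2)) (pI post) := by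
              simp only [List.map_cons, List.map_map, Nat.zero_add]
              congr 1
              congr 1
              apply List.map_congr_left
              intro a _
              simp [Function.comp]
              omega
            rw [hidx]
            simp only [fixPairs]
            rw [stepFix_hole (hVal q) (hole_shape hs' hg').1 (hole_shape hs' hg').2.1 _]
            have hre : ([hVal p, hVal q] : List Int) :: (goodsOf pre ++ [q.getD 0 0, q.getD 1 0] :: pA post)
                = ([hVal p, hVal q] :: goodsOf pre ++ [[q.getD 0 0, q.getD 1 0]]) ++ pA post := by
              simp
            rw [hre, fixPairs_shift' (pA post) (pR post) (pI post)
              ([hVal p, hVal q] :: goodsOf pre ++ [[q.getD 0 0, q.getD 1 0]])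
              (by simp [List.length_append])]
            have hf1 : List.filter keepNZ
                  ([hVal p, hVal q] :: goodsOf pre ++ [[q.getD 0 0, q.getD 1 0]])
                = [hVal p, hVal q] :: goodsOf pre := by
              rw [show ([hVal p, hVal q] : List Int) :: goodsOf pre ++ [[q.getD 0 0, q.getD 1 0]]
                    = [hVal p, hVal q] :: (goodsOf pre ++ [[q.getD 0 0, q.getD 1 0]]) from rfl]
              rw [List.filter_cons, keepNZ_pair (hole_shape hs' hg').1 (hq3 ▸ (hole_shape hq1 hq2).1)]
              simp [List.filter_append, List.filter_eq_self.mpr keepNZ_goods]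
              simpa [List.getD] using (hole_shape hq1 hq2).2.2
            rw [List.filter_append, hf1, ih post hpostn]
            rw [go_hole_some hs' hg' hE, ← hq3, go_append_goods pre hpre post]
            simp

-- ===== VERDICT (by name: the statement is the Claim_ definition above) =====
theorem bad_apples_spec : Claim_equal_bad_apples := by
  intro apples _ _
  unfold Spec_bad_apples
  have hA : bad_apples apples = (fixPairs (pA apples) (pR apples) (pI apples)).filter keepNZ := by
    unfold bad_apples
    rw [passA_eta]
    exact congrArg (List.filter keepNZ) (fixLoop (pA apples) (pR apples) (pI apples) (pRI_len apples))
  have hB : bad_apples_alt apples = go apples := by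
    unfold bad_apples_alt
    have := altB apples.length apples le_rfl []
    simpa using this
  rw [hA, hB, altA apples.length apples le_rfl]
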